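-- pv_equiv track=rewrite | github.com/nobe0716/problem_solving | codeforces/contests/1374/E1. Reading Books (easy version).py | solve
-- ===== SOURCE A (Python) =====
-- from typing import List, Tuple
--
-- def solve(n: int, k: int, tab: List[Tuple[int, int, int]]):
--     both, a_only, b_only = [], [], []
--     for t, a, b in tab:
--         if a == 1 and b == 1:
--             both.append(t)
--         elif a == 1:
--             a_only.append(t)
--         elif b == 1:
--             b_only.append(t)
--     both.sort()
--     a_only.sort()
--     b_only.sort()
--
--     idx_both = idx_a_only = idx_b_only = 0
--     len_both, len_a_only, len_b_only = len(both), len(a_only), len(b_only)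
--     times = []
--     while len(times) < k and idx_both < len_both and idx_a_only < len_a_only and idx_b_only < len_b_only:
--         if both[idx_both] < a_only[idx_a_only] + b_only[idx_b_only]:
--             times.append(both[idx_both])
--             idx_both += 1
--         else:
--             times.append(a_only[idx_a_only] + b_only[idx_b_only])
--             idx_a_only += 1
--             idx_b_only += 1
--     while len(times) < k and idx_both < len_both:
--         times.append(both[idx_both])
--         idx_both += 1
--
--     while len(times) < k and idx_a_only < len_a_only and idx_b_only < len_b_only:
--         times.append(a_only[idx_a_only] + b_only[idx_b_only])
--         idx_a_only += 1
--         idx_b_only += 1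
--     return sum(times) if len(times) == k else -1
-- ===== SOURCE B (Python) =====
-- from typing import List, Tuple
--
-- def solve(n: int, k: int, tab: List[Tuple[int, int, int]]):
--     both = sorted(t for t, a, b in tab if a == 1 and b == 1)
--     a_only = sorted(t for t, a, b in tab if a == 1 and b != 1)
--     b_only = sorted(t for t, a, b in tab if a != 1 and b == 1)
--     pool = sorted(both + [x + y for x, y in zip(a_only, b_only)])
--     if k < 0 or k > len(pool):
--         return -1
--     return sum(pool[:k])
-- ===== Notes on version B (the rewrite author's own statement) =====
-- stated objective: simpler
-- what changed: Replaces A's three greedy merge loops over both/a_only/b_only cursors by one pass: sort the pool of 'both' times together with the pairwise a_only+b_only sums and sum its k-prefix (-1 if the pool has fewer than k elements); correct because the greedy merge of two sorted streams produces exactly the sorted pool's k smallest elements.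
import Mathlib
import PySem

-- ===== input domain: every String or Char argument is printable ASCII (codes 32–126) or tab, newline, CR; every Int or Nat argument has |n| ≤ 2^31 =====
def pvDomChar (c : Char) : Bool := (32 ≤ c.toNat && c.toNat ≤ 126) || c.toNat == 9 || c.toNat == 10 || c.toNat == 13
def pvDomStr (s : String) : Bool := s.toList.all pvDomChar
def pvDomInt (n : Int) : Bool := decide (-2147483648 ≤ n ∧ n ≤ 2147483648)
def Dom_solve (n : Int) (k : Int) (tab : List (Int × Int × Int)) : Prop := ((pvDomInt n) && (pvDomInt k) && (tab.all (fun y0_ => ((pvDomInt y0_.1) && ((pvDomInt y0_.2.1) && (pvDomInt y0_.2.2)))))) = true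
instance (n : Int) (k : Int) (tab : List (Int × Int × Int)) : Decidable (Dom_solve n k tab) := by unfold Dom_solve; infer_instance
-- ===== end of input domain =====

-- B replaces A's three-way greedy merge loops by one sorted pool (both ∪ pairwise sums) with a
-- prefix sum: simpler, same cost; return-value equivalence only (A mutates nothing observable).

-- ===== PORT A =====
-- A's partitioning loop over tab (appends, same branch order).
def solvePart (tab : List (Int × Int × Int)) : List Int × List Int × List Int :=
  tab.foldl (fun acc x =>
    if x.2.1 = 1 ∧ x.2.2 = 1 then (acc.1 ++ [x.1], acc.2.1, acc.2.2)
    else if x.2.1 = 1 then (acc.1, acc.2.1 ++ [x.1], acc.2.2)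
    else if x.2.2 = 1 then (acc.1, acc.2.1, acc.2.2 ++ [x.1])
    else acc) ([], [], [])

-- A's first while loop (three cursors, rendered as recursion on the remaining suffixes).
def solveLoop1 (k : Int) (times both aonly bonly : List Int) :
    List Int × List Int × List Int × List Int :=
  if (times.length : Int) < k then
    match both, aonly, bonly with
    | x :: bs, y :: as_, z :: cs =>
        if x < y + z then solveLoop1 k (times ++ [x]) bs (y :: as_) (z :: cs)
        else solveLoop1 k (times ++ [y + z]) (x :: bs) as_ cs
    | bs, as_, cs => (times, bs, as_, cs)
  else (times, both, aonly, bonly)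
termination_by both.length + aonly.length
decreasing_by all_goals (simp only [List.length_cons]; omega)

-- A's second while loop (drains `both`).
def solveLoop2 (k : Int) (times both : List Int) : List Int :=
  match both with
  | [] => times
  | x :: bs => if (times.length : Int) < k then solveLoop2 k (times ++ [x]) bs else times

-- A's third while loop (drains the a_only/b_only pairs).
def solveLoop3 (k : Int) (times aonly bonly : List Int) : List Int :=
  match aonly, bonly with
  | y :: as_, z :: cs =>
      if (times.length : Int) < k then solveLoop3 k (times ++ [y + z]) as_ cs else times
  | _, _ => times

def solve (n : Int) (k : Int) (tab : List (Int × Int × Int)) : Int :=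
  let p := solvePart tab
  let both := PySem.List.sorted p.1 (fun x => x) false
  let aonly := PySem.List.sorted p.2.1 (fun x => x) false
  let bonly := PySem.List.sorted p.2.2 (fun x => x) false
  let r := solveLoop1 k [] both aonly bonly
  let t2 := solveLoop2 k r.1 r.2.1
  let times := solveLoop3 k t2 r.2.2.1 r.2.2.2
  if (times.length : Int) = k then times.sum else -1

-- ===== PORT B =====
def solve_alt (n : Int) (k : Int) (tab : List (Int × Int × Int)) : Int :=
  let both := PySem.List.sorted ((tab.filter fun x => decide (x.2.1 = 1 ∧ x.2.2 = 1)).map (·.1)) (fun x => x) false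
  let aonly := PySem.List.sorted ((tab.filter fun x => decide (x.2.1 = 1 ∧ x.2.2 ≠ 1)).map (·.1)) (fun x => x) false
  let bonly := PySem.List.sorted ((tab.filter fun x => decide (x.2.1 ≠ 1 ∧ x.2.2 = 1)).map (·.1)) (fun x => x) false
  let pool := PySem.List.sorted (both ++ (aonly.zip bonly).map (fun p => p.1 + p.2)) (fun x => x) false
  if k < 0 ∨ (pool.length : Int) < k then -1
  else (pool.take k.toNat).sum

-- ===== PRECONDITION & SPEC =====
def Spec_solve (n : Int) (k : Int) (tab : List (Int × Int × Int)) (out : Int) : Prop := out = solve_alt n k tab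
instance (n : Int) (k : Int) (tab : List (Int × Int × Int)) (out : Int) : Decidable (Spec_solve n k tab out) := by unfold Spec_solve; infer_instance

-- ===== CLAIM (what is proved, stated in full; the proofs are below) =====
def Claim_equal_solve : Prop := ∀ (n : Int) (k : Int) (tab : List (Int × Int × Int)), Dom_solve n k tab → Spec_solve n k tab (solve n k tab)

-- ===== LEMMAS AND PROOFS =====

-- The order A's merge loops produce: take from `both` on strict <, from the pair stream otherwise.
def mergeA : List Int → List Int → List Int
  | [], ys => ys
  | x :: xs, [] => x :: xs
  | x :: xs, y :: ys => if x < y then x :: mergeA xs (y :: ys) else y :: mergeA (x :: xs) ys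
termination_by xs ys => xs.length + ys.length
decreasing_by all_goals (simp only [List.length_cons]; omega)

theorem mergeA_perm (xs ys : List Int) : (mergeA xs ys).Perm (xs ++ ys) := by
  induction xs, ys using mergeA.induct with
  | case1 ys => simp [mergeA]
  | case2 x xs => simp [mergeA]
  | case3 x xs y ys h ih =>
      simp only [mergeA, if_pos h]
      exact (ih.cons x)
  | case4 x xs y ys h ih =>
      simp only [mergeA, if_neg h]
      exact ((ih.cons y).trans (List.perm_middle (a := y) (l₁ := x :: xs) (l₂ := ys)).symm)

theorem mem_mergeA {a : Int} {xs ys : List Int} : a ∈ mergeA xs ys ↔ a ∈ xs ∨ a ∈ ys := by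
  constructor
  · intro h; have := (mergeA_perm xs ys).mem_iff.mp h; simpa using this
  · intro h; exact (mergeA_perm xs ys).mem_iff.mpr (by simpa using h)

theorem mergeA_pairwise {xs ys : List Int}
    (hx : List.Pairwise (· ≤ ·) xs) (hy : List.Pairwise (· ≤ ·) ys) :
    List.Pairwise (· ≤ ·) (mergeA xs ys) := by
  induction xs, ys using mergeA.induct with
  | case1 ys => simpa [mergeA] using hy
  | case2 x xs => simpa [mergeA] using hx
  | case3 x xs y ys h ih =>
      simp only [mergeA, if_pos h]
      rw [List.pairwise_cons] at hx ⊢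
      refine ⟨?_, ih hx.2 hy⟩
      intro a ha
      rcases mem_mergeA.mp ha with h1 | h1
      · exact hx.1 a h1
      · rcases List.mem_cons.mp h1 with rfl | h2
        · exact le_of_lt h
        · rw [List.pairwise_cons] at hy
          exact le_trans (le_of_lt h) (hy.1 a h2)
  | case4 x xs y ys h ih =>
      simp only [mergeA, if_neg h]
      rw [List.pairwise_cons] at hy ⊢
      refine ⟨?_, ih hx hy.2⟩
      intro a ha
      rcases mem_mergeA.mp ha with h1 | h1
      · rcases List.mem_cons.mp h1 with rfl | h2
        · omega
        · rw [List.pairwise_cons] at hx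
          have := hx.1 a h2
          omega
      · exact hy.1 a h1

theorem zipWith_pairwise {xs ys : List Int}
    (hx : List.Pairwise (· ≤ ·) xs) (hy : List.Pairwise (· ≤ ·) ys) :
    List.Pairwise (· ≤ ·) (List.zipWith (· + ·) xs ys) := by
  rw [List.pairwise_iff_getElem] at hx hy ⊢
  intro i j hi hj hij
  simp only [List.length_zipWith] at hi hj
  rw [List.getElem_zipWith, List.getElem_zipWith]
  have h1 := hx i j (by omega) (by omega) hij
  have h2 := hy i j (by omega) (by omega) hij
  omega

theorem zip_map_eq_zipWith (xs ys : List Int) :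
    (xs.zip ys).map (fun p => p.1 + p.2) = List.zipWith (· + ·) xs ys := by
  induction xs generalizing ys with
  | nil => simp
  | cons x xs ih => cases ys <;> simp [ih]

-- A's partition foldl, characterised by filters.
theorem part_foldl (tab : List (Int × Int × Int)) (X Y Z : List Int) :
    tab.foldl (fun acc x =>
      if x.2.1 = 1 ∧ x.2.2 = 1 then (acc.1 ++ [x.1], acc.2.1, acc.2.2)
      else if x.2.1 = 1 then (acc.1, acc.2.1 ++ [x.1], acc.2.2)
      else if x.2.2 = 1 then (acc.1, acc.2.1, acc.2.2 ++ [x.1])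
      else acc) (X, Y, Z)
    = (X ++ (tab.filter fun x => decide (x.2.1 = 1 ∧ x.2.2 = 1)).map (·.1),
       Y ++ (tab.filter fun x => decide (x.2.1 = 1 ∧ x.2.2 ≠ 1)).map (·.1),
       Z ++ (tab.filter fun x => decide (x.2.1 ≠ 1 ∧ x.2.2 = 1)).map (·.1)) := by
  induction tab generalizing X Y Z with
  | nil => simp
  | cons hd tl ih =>
      by_cases h1 : hd.2.1 = 1 <;> by_cases h2 : hd.2.2 = 1 <;>
        simp [List.foldl_cons, h1, h2, ih, List.append_assoc]

-- loop2 appends a prefix of `both`.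
theorem solveLoop2_eq (k : Int) (acc xs : List Int) :
    solveLoop2 k acc xs = acc ++ xs.take (k.toNat - acc.length) := by
  induction xs generalizing acc with
  | nil => simp [solveLoop2]
  | cons x bs ih =>
      by_cases h : (acc.length : Int) < k
      · have hk : k.toNat - acc.length = (k.toNat - (acc.length + 1)) + 1 := by omega
        rw [solveLoop2, if_pos h, ih, hk, List.take_succ_cons]
        simp
      · have hk : k.toNat - acc.length = 0 := by omega
        rw [solveLoop2, if_neg h, hk]
        simp

-- loop3 appends a prefix of the pair-sum stream.
theorem solveLoop3_eq (k : Int) (acc as bs : List Int) :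
    solveLoop3 k acc as bs = acc ++ (List.zipWith (· + ·) as bs).take (k.toNat - acc.length) := by
  induction as generalizing bs acc with
  | nil => simp [solveLoop3]
  | cons y as' ih =>
      cases bs with
      | nil => simp [solveLoop3]
      | cons z cs =>
          by_cases h : (acc.length : Int) < k
          · have hk : k.toNat - acc.length = (k.toNat - (acc.length + 1)) + 1 := by omega
            rw [solveLoop3, if_pos h, ih, hk]
            simp [List.take_succ_cons]
          · have hk : k.toNat - acc.length = 0 := by omega
            rw [solveLoop3, if_neg h, hk]
            simp

-- The full three-loop pipeline equals taking a prefix of mergeA.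
theorem mergeA_nil_right (xs : List Int) : mergeA xs [] = xs := by
  cases xs <;> simp [mergeA]

-- The full three-loop pipeline equals taking a prefix of mergeA.
theorem pipeline_eq (k : Int) (acc xs as bs : List Int) :
    (let r := solveLoop1 k acc xs as bs
     solveLoop3 k (solveLoop2 k r.1 r.2.1) r.2.2.1 r.2.2.2)
    = acc ++ (mergeA xs (List.zipWith (· + ·) as bs)).take (k.toNat - acc.length) := by
  induction acc, xs, as, bs using solveLoop1.induct (k := k) with
  | case1 times hcond x bs' y as' z cs hx ih =>
      simp only at ih ⊢
      rw [solveLoop1.eq_def, if_pos hcond]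
      simp only [if_pos hx]
      rw [ih]
      have hk : k.toNat - times.length = (k.toNat - (times.length + 1)) + 1 := by omega
      simp only [List.zipWith_cons_cons, mergeA, if_pos hx, hk, List.take_succ_cons,
        List.length_append, List.length_cons, List.length_nil]
      simp
  | case2 times hcond x bs' y as' z cs hx ih =>
      simp only at ih ⊢
      rw [solveLoop1.eq_def, if_pos hcond]
      simp only [if_neg hx]
      rw [ih]
      have hk : k.toNat - times.length = (k.toNat - (times.length + 1)) + 1 := by omega
      simp only [List.zipWith_cons_cons, mergeA, if_neg hx, hk, List.take_succ_cons,
        List.length_append, List.length_cons, List.length_nil]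
      simp
  | case3 times hcond bs as_ cs hshape =>
      simp only
      rw [solveLoop1.eq_def, if_pos hcond]
      cases bs with
      | nil =>
          simp only [solveLoop2, mergeA]
          rw [solveLoop3_eq]
      | cons x bs' =>
          cases as_ with
          | nil =>
              rw [solveLoop2_eq]
              simp [solveLoop3, mergeA_nil_right]
          | cons y as' =>
              cases cs with
              | nil =>
                  simp only [List.zipWith_nil_right, mergeA_nil_right]
                  rw [solveLoop2_eq]
                  simp [solveLoop3]
              | cons z cs' => exact (hshape x bs' y as' z cs' rfl rfl rfl).elim
  | case4 times both aonly bonly hcond =>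
      simp only
      rw [solveLoop1.eq_def, if_neg hcond]
      rw [solveLoop2_eq, solveLoop3_eq]
      have h0 : k.toNat - times.length = 0 := by omega
      simp [h0]

theorem solve_eq_take (k : Int) (both aonly bonly : List Int) :
    (let r := solveLoop1 k [] both aonly bonly
     solveLoop3 k (solveLoop2 k r.1 r.2.1) r.2.2.1 r.2.2.2)
    = (mergeA both (List.zipWith (· + ·) aonly bonly)).take k.toNat := by
  rw [pipeline_eq]; simp

-- ===== VERDICT (by name: the statement is the Claim_ definition above) =====
theorem solve_spec : Claim_equal_solve := by
  intro n k tab _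
  unfold Spec_solve solve solve_alt
  rw [show solvePart tab = _ from part_foldl tab [] [] []]
  simp only [List.nil_append]
  set bothF := (tab.filter fun x => decide (x.2.1 = 1 ∧ x.2.2 = 1)).map (·.1) with hbF
  set aF := (tab.filter fun x => decide (x.2.1 = 1 ∧ x.2.2 ≠ 1)).map (·.1) with haF
  set bF := (tab.filter fun x => decide (x.2.1 ≠ 1 ∧ x.2.2 = 1)).map (·.1) with hbF2
  set both := PySem.List.sorted bothF (fun x => x) false with hb
  set aonly := PySem.List.sorted aF (fun x => x) false with ha
  set bonly := PySem.List.sorted bF (fun x => x) false with hbo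
  have hpairs : (aonly.zip bonly).map (fun p => p.1 + p.2) = List.zipWith (· + ·) aonly bonly :=
    zip_map_eq_zipWith _ _
  have hsb : List.Pairwise (· ≤ ·) both := PySem.List.sorted_pairwise bothF (fun x => x)
  have hsa : List.Pairwise (· ≤ ·) aonly := PySem.List.sorted_pairwise aF (fun x => x)
  have hsbo : List.Pairwise (· ≤ ·) bonly := PySem.List.sorted_pairwise bF (fun x => x)
  have hpool : PySem.List.sorted (both ++ (aonly.zip bonly).map (fun p => p.1 + p.2)) (fun x => x) false
      = mergeA both (List.zipWith (· + ·) aonly bonly) := by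
    rw [hpairs]
    exact PySem.List.sorted_id_eq_of_perm_of_pairwise _ _
      (mergeA_perm _ _) (mergeA_pairwise hsb (zipWith_pairwise hsa hsbo))
  rw [hpool]
  have hmain := solve_eq_take k both aonly bonly
  simp only at hmain
  rw [hmain]
  set M := mergeA both (List.zipWith (· + ·) aonly bonly) with hM
  rw [List.length_take]
  by_cases hk : k < 0 ∨ (M.length : Int) < k
  · rw [if_pos hk, if_neg (by push_cast; omega)]
  · rw [if_neg hk, if_pos (by push_cast; omega)]
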